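-- pv_equiv track=rewrite | github.com/successfulbarrier/python_tools | leetcode/tricks/1.生成二维数组.py | createArray2D
-- ===== SOURCE A (Python) =====
-- def createArray2D(h, w):
--     arr = []
--     for y in range(h):
--         line = []
--         for x in range(w):
--             line.append(x)
--         arr.append(line)
--     return arr
-- ===== SOURCE B (Python) =====
-- def createArray2D(h, w):
--     if h <= 0:
--         return []
--     rows = [list(range(w))]
--     while len(rows) < h:
--         need = h - len(rows)
--         rows = rows + [list(r) for r in rows[:need]]
--     return rows
-- ===== Notes on version B (the rewrite author's own statement) =====
-- stated objective: alternative
-- what changed: B builds one 0..w-1 row via range and replicates the row list by repeated block-doubling (O(log h) concatenation passes of bulk list copies), instead of A's nested per-row per-element append loops.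
import Mathlib
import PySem

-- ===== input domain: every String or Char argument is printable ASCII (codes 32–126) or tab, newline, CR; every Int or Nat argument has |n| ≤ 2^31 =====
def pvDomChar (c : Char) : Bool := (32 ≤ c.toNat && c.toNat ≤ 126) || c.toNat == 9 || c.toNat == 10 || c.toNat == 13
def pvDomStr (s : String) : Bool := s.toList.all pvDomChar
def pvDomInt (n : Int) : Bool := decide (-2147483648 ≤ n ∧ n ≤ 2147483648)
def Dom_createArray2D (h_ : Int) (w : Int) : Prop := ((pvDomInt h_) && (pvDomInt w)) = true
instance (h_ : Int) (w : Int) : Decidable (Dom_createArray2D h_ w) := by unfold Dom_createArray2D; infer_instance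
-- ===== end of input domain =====

-- B replicates a single 0..w-1 row by repeated block-doubling (copy the whole current block each pass) instead of A's nested per-row per-element append loops (objective: alternative).


-- ===== PORT A =====
-- arr = []; for y in range(h): line=[]; for x in range(w): line.append(x); arr.append(line)
def createArray2D (h_ : Int) (w : Int) : List (List Int) :=
  (PySem.List.pyRange 0 h_ 1).foldl
    (fun arr _y =>
      arr ++ [(PySem.List.pyRange 0 w 1).foldl (fun line x => line ++ [x]) []])
    []

-- ===== PORT B =====
-- while len(rows) < h: need = h - len(rows); rows = rows + [list(r) for r in rows[:need]]
-- ('0 < rows.length' in the guard is a totality guard only: the Python loop is entered with rows = [row], never empty)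
def pvGrow (h : Nat) (rows : List (List Int)) : List (List Int) :=
  if _hlt : rows.length < h ∧ 0 < rows.length then
    pvGrow h (rows ++ (rows.take (h - rows.length)).map (fun r => r))
  else rows
termination_by h - rows.length
decreasing_by
  simp only [List.length_append, List.length_map, List.length_take]
  omega

-- if h <= 0: return []; rows = [list(range(w))]; loop; return rows
def createArray2D_alt (h_ : Int) (w : Int) : List (List Int) :=
  if h_ ≤ 0 then []
  else pvGrow h_.toNat [PySem.List.pyRange 0 w 1]

-- ===== PRECONDITION & SPEC =====
def Spec_createArray2D (h_ : Int) (w : Int) (out : List (List Int)) : Prop := out = createArray2D_alt h_ w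
instance (h_ : Int) (w : Int) (out : List (List Int)) : Decidable (Spec_createArray2D h_ w out) := by unfold Spec_createArray2D; infer_instance

-- ===== CLAIM (what is proved, stated in full; the proofs are below) =====
def Claim_equal_createArray2D : Prop := ∀ (h_ : Int) (w : Int), Dom_createArray2D h_ w → Spec_createArray2D h_ w (createArray2D h_ w)

-- ===== LEMMAS AND PROOFS =====
-- appending each element of l to an accumulator rebuilds l
theorem foldl_append_singleton (l acc : List Int) :
    l.foldl (fun line x => line ++ [x]) acc = acc ++ l := by
  induction l generalizing acc with
  | nil => simp
  | cons a t ih => simp [List.foldl, ih, List.append_assoc]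

-- appending a constant per element equals replicate of the length
theorem foldl_append_const (l : List Int) (acc : List (List Int)) (c : List Int) :
    l.foldl (fun arr _ => arr ++ [c]) acc = acc ++ List.replicate l.length c := by
  induction l generalizing acc with
  | nil => simp
  | cons a t ih => simp [List.foldl, ih, List.append_assoc, List.replicate_succ]

-- growing a nonempty block of identical rows by doubling reaches replicate (max n h)
theorem pvGrow_replicate (row : List Int) (h n : Nat) (hn : 1 ≤ n) :
    pvGrow h (List.replicate n row) = List.replicate (max n h) row := by
  rw [pvGrow]
  by_cases hlt : n < h
  · have hcond : (List.replicate n row).length < h ∧ 0 < (List.replicate n row).length := by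
      simp [hlt]; omega
    rw [dif_pos hcond]
    have harg : List.replicate n row ++
        ((List.replicate n row).take (h - (List.replicate n row).length)).map (fun r => r) =
        List.replicate (n + min (h - n) n) row := by
      simp [List.take_replicate, List.replicate_append_replicate]
    rw [harg, pvGrow_replicate row h (n + min (h - n) n) (by omega)]
    congr 1
    omega
  · have hcond : ¬ ((List.replicate n row).length < h ∧ 0 < (List.replicate n row).length) := by
      simp; omega
    rw [dif_neg hcond]
    congr 1
    omega
termination_by h - n
decreasing_by omega

-- ===== VERDICT (by name: the statement is the Claim_ definition above) =====
theorem createArray2D_spec : Claim_equal_createArray2D := by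
  intro h_ w _
  unfold Spec_createArray2D createArray2D createArray2D_alt
  rw [foldl_append_const, foldl_append_singleton, PySem.List.length_pyRange_one]
  by_cases hpos : h_ ≤ 0
  · simp [hpos]
  · rw [if_neg hpos]
    have : ([] : List Int) ++ PySem.List.pyRange 0 w 1 = PySem.List.pyRange 0 w 1 := by simp
    rw [this]
    have h1 : [PySem.List.pyRange 0 w 1] = List.replicate 1 (PySem.List.pyRange 0 w 1) := rfl
    rw [h1, pvGrow_replicate _ _ 1 (le_refl 1)]
    have h2 : (h_ - 0).toNat = max 1 h_.toNat := by omega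
    rw [List.nil_append, h2]
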